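-- pv_equiv track=rewrite | github.com/KostasKv/Minesweeper-with-AI | minesweeper_ai/agents/no_unnecessary_guess_solver.py | check_if_sample_has_wall
-- ===== SOURCE A (Python) =====
-- def check_if_sample_has_wall(sample):
--     non_wall_tiles_in_sample = 0
--     top_is_wall = False
--     right_is_wall = False
--     bottom_is_wall = False
--     left_is_wall = False
--     max_x = len(sample[0]) - 1
--     max_y = len(sample) - 1
--
--     # Count number of non wall tiles inside sample, and figure out where the walls are (relative to sample) if any are detected.
--     for (y, row) in enumerate(sample):
--         for (x, tile) in enumerate(row):
--             if tile is None:
--                 is_corner = (x, y) in [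
--                     (0, 0),
--                     (0, max_y),
--                     (max_x, 0),
--                     (max_x, max_y),
--                 ]
--
--                 # Can't assume whether row or column is walls from a corner.
--                 if is_corner:
--                     continue
--
--                 if y == 0:
--                     top_is_wall = True
--                 elif y == max_y:
--                     bottom_is_wall = True
--
--                 if x == 0:
--                     left_is_wall = True
--                 elif x == max_x:
--                     right_is_wall = True
--             else:
--                 non_wall_tiles_in_sample += 1
--
--     has_wall = {
--         "top": top_is_wall,
--         "right": right_is_wall,
--         "bottom": bottom_is_wall,
--         "left": left_is_wall,
--     }
--
--     return (has_wall, non_wall_tiles_in_sample)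
-- ===== SOURCE B (Python) =====
-- def check_if_sample_has_wall(sample):
--     max_x = len(sample[0]) - 1
--     max_y = len(sample) - 1
--
--     # One flat count of non-wall tiles over all cells.
--     non_wall_tiles_in_sample = sum(
--         1 for row in sample for tile in row if tile is not None
--     )
--
--     # Walls can only be detected on the (non-corner) border cells, so scan
--     # just the borders instead of classifying every cell.
--     top_is_wall = any(sample[0][x] is None for x in range(1, max_x))
--     bottom_is_wall = max_y != 0 and any(
--         tile is None
--         for x, tile in enumerate(sample[max_y])
--         if x != 0 and x != max_x
--     )
--     left_is_wall = any(row[:1] == [None] for row in sample[1:max_y])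
--     right_is_wall = max_x != 0 and any(
--         row[max_x:max_x + 1] == [None] for row in sample[1:max_y]
--     )
--
--     has_wall = {
--         "top": top_is_wall,
--         "right": right_is_wall,
--         "bottom": bottom_is_wall,
--         "left": left_is_wall,
--     }
--
--     return (has_wall, non_wall_tiles_in_sample)
-- ===== Notes on version B (the rewrite author's own statement) =====
-- stated objective: faster
-- what changed: Instead of classifying every cell with corner/edge branches in one nested loop, B counts non-wall tiles with a single flat sum and detects each of the four walls by scanning only the corresponding border (row 0, last row, first/last column of the middle rows), with max_y!=0 / max_x!=0 guards mirroring the if/elif precedence.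
import Mathlib
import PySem

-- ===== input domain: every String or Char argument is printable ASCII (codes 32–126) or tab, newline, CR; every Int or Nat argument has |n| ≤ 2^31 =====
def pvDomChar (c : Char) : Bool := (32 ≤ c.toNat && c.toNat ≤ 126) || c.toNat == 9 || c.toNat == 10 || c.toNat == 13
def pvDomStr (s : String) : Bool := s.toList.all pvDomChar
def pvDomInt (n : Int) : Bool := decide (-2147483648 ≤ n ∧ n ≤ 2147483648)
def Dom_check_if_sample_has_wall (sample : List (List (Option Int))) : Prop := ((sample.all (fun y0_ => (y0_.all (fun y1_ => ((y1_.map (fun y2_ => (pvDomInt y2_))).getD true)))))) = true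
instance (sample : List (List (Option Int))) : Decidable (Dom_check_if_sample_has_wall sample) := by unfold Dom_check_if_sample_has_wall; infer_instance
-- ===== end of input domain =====

-- B computes the same result by one flat count plus border-only scans instead of classifying every cell; equivalence is about the return value (A mutates nothing).


-- ===== PORT A =====
-- is_corner test of A ((x, y) in [(0,0), (0,max_y), (max_x,0), (max_x,max_y)])
def pvCorner (mx my x y : Int) : Bool :=
  (x == 0 && y == 0) || (x == 0 && y == my) || (x == mx && y == 0) || (x == mx && y == my)

-- state: (non_wall_tiles_in_sample, top, right, bottom, left), updated cell by cell as in A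
def pvCellStep (mx my y : Int) (st : Int × Bool × Bool × Bool × Bool) (xt : Int × Option Int) :
    Int × Bool × Bool × Bool × Bool :=
  match st with
  | (cnt, top, right, bottom, left) =>
    match xt.2 with
    | none =>
      if pvCorner mx my xt.1 y then (cnt, top, right, bottom, left)
      else
        -- 'if y == 0: top = True  elif y == max_y: bottom = True'
        let top := if y == 0 then true else top
        let bottom := if !(y == 0) && y == my then true else bottom
        -- 'if x == 0: left = True  elif x == max_x: right = True'
        let left := if xt.1 == 0 then true else left
        let right := if !(xt.1 == 0) && xt.1 == mx then true else right
        (cnt, top, right, bottom, left)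
    | some _ => (cnt + 1, top, right, bottom, left)

def check_if_sample_has_wall (sample : List (List (Option Int))) : (List (String × Bool)) × Int :=
  let max_x : Int := PySem.List.len (sample.headD []) - 1   -- len(sample[0]) - 1; Pre_ excludes sample = []
  let max_y : Int := PySem.List.len sample - 1
  let st := (PySem.List.enumerate sample).foldl
    (fun st yrow => (PySem.List.enumerate yrow.2).foldl (pvCellStep max_x max_y yrow.1) st)
    ((0 : Int), false, false, false, false)
  ([("top", st.2.1), ("right", st.2.2.1), ("bottom", st.2.2.2.1), ("left", st.2.2.2.2)], st.1)

-- ===== PORT B =====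
def check_if_sample_has_wall_alt (sample : List (List (Option Int))) : (List (String × Bool)) × Int :=
  let row0 := sample.headD []                               -- sample[0]; Pre_ excludes sample = []
  let max_x : Int := PySem.List.len row0 - 1
  let max_y : Int := PySem.List.len sample - 1
  -- sum(1 for row in sample for tile in row if tile is not None)
  let cnt : Int := sample.foldl (fun c row => row.foldl (fun c t => if t.isSome then c + 1 else c) c) 0
  -- any(sample[0][x] is None for x in range(1, max_x))
  let top := (PySem.List.pyRange 1 max_x 1).any (fun x => PySem.List.pyGet? row0 x == some none)
  -- max_y != 0 and any(tile is None for x, tile in enumerate(sample[max_y]) if x != 0 and x != max_x)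
  let bottom := !(max_y == 0) && (PySem.List.enumerate (PySem.List.pyGetD sample max_y [])).any
      (fun xt => !(xt.1 == 0) && !(xt.1 == max_x) && xt.2 == none)
  -- sample[1:max_y]
  let mid := PySem.List.slice sample (some 1) (some max_y)
  -- any(row[:1] == [None] for row in sample[1:max_y])
  let left := mid.any (fun row => PySem.List.slice row none (some 1) == [(none : Option Int)])
  -- max_x != 0 and any(row[max_x:max_x+1] == [None] for row in sample[1:max_y])
  let right := !(max_x == 0) && mid.any
      (fun row => PySem.List.slice row (some max_x) (some (max_x + 1)) == [(none : Option Int)])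
  ([("top", top), ("right", right), ("bottom", bottom), ("left", left)], cnt)

-- ===== PRECONDITION & SPEC =====
-- Pre_ excludes only the empty grid, on which A raises IndexError at sample[0] (B raises there too).
def Pre_check_if_sample_has_wall (sample : List (List (Option Int))) : Prop := sample ≠ []
instance (sample : List (List (Option Int))) : Decidable (Pre_check_if_sample_has_wall sample) := by
  unfold Pre_check_if_sample_has_wall; infer_instance

def pvWitness_check_if_sample_has_wall : List (List (Option Int)) := [[some 1, none], [some 2, some 3]]

def Spec_check_if_sample_has_wall (sample : List (List (Option Int))) (out : (List (String × Bool)) × Int) : Prop := out = check_if_sample_has_wall_alt sample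
instance (sample : List (List (Option Int))) (out : (List (String × Bool)) × Int) : Decidable (Spec_check_if_sample_has_wall sample out) := by unfold Spec_check_if_sample_has_wall; infer_instance

-- ===== CLAIM (what is proved, stated in full; the proofs are below) =====
def Claim_equal_check_if_sample_has_wall : Prop := ∀ (sample : List (List (Option Int))), Dom_check_if_sample_has_wall sample → Pre_check_if_sample_has_wall sample → Spec_check_if_sample_has_wall sample (check_if_sample_has_wall sample)

-- ===== LEMMAS AND PROOFS =====

-- per-cell wall predicates extracted from pvCellStep
def pTop (mx my y : Int) (e : Int × Option Int) : Bool :=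
  e.2 == none && !pvCorner mx my e.1 y && y == 0
def pBottom (mx my y : Int) (e : Int × Option Int) : Bool :=
  e.2 == none && !pvCorner mx my e.1 y && !(y == 0) && y == my
def pLeft (mx my y : Int) (e : Int × Option Int) : Bool :=
  e.2 == none && !pvCorner mx my e.1 y && e.1 == 0
def pRight (mx my y : Int) (e : Int × Option Int) : Bool :=
  e.2 == none && !pvCorner mx my e.1 y && !(e.1 == 0) && e.1 == mx

lemma inner_char (mx my y : Int) (row : List (Int × Option Int)) (cnt : Int) (t r b l : Bool) :
    row.foldl (pvCellStep mx my y) (cnt, t, r, b, l) =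
      (cnt + (row.countP (fun e => e.2.isSome) : Int),
       t || row.any (pTop mx my y),
       r || row.any (pRight mx my y),
       b || row.any (pBottom mx my y),
       l || row.any (pLeft mx my y)) := by
  induction row generalizing cnt t r b l with
  | nil => simp
  | cons e row ih =>
    obtain ⟨x, tile⟩ := e
    cases tile with
    | some v =>
      simp only [List.foldl_cons, pvCellStep, ih, List.any_cons]
      simp [pTop, pBottom, pLeft, pRight, Prod.ext_iff]
      omega
    | none =>
      simp only [List.foldl_cons, pvCellStep]
      by_cases hcor : pvCorner mx my x y = true
      · rw [if_pos hcor, ih]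
        simp [List.any_cons, pTop, pBottom, pLeft, pRight, hcor]
      · rw [if_neg hcor, ih]
        have hcor' := eq_false_of_ne_true hcor
        cases h0 : (y == 0) <;> cases h1 : (x == 0) <;> cases hmy : (y == my) <;> cases hmx : (x == mx) <;>
          simp [List.any_cons, pTop, pBottom, pLeft, pRight, h0, h1, hmy, hmx, hcor']
lemma outer_char (mx my : Int) (rows : List (Int × List (Option Int))) (cnt : Int) (t r b l : Bool) :
    rows.foldl (fun st yrow => (PySem.List.enumerate yrow.2).foldl (pvCellStep mx my yrow.1) st)
        (cnt, t, r, b, l) =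
      (cnt + ((rows.map (fun yrow => ((PySem.List.enumerate yrow.2).countP (fun e => e.2.isSome) : Int))).sum),
       t || rows.any (fun yrow => (PySem.List.enumerate yrow.2).any (pTop mx my yrow.1)),
       r || rows.any (fun yrow => (PySem.List.enumerate yrow.2).any (pRight mx my yrow.1)),
       b || rows.any (fun yrow => (PySem.List.enumerate yrow.2).any (pBottom mx my yrow.1)),
       l || rows.any (fun yrow => (PySem.List.enumerate yrow.2).any (pLeft mx my yrow.1))) := by
  induction rows generalizing cnt t r b l with
  | nil => simp
  | cons yrow rows ih =>
    simp only [List.foldl_cons, inner_char, ih, List.map_cons, List.sum_cons, List.any_cons,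
      Bool.or_assoc, add_assoc]
lemma any_enum_iff {α : Type} (xs : List α) (s : Int) (q : Int × α → Bool) :
    (PySem.List.enumerate xs s).any q = true ↔
      ∃ (k : Nat) (_ : k < xs.length), q (s + k, xs[k]) = true := by
  simp [List.any_eq_true, PySem.List.mem_enumerate_iff]

lemma bcnt_row (r : List (Option Int)) (d : Int) :
    r.foldl (fun c t => if t.isSome then c + 1 else c) d = d + (r.countP (fun t => t.isSome) : Int) := by
  induction r generalizing d with
  | nil => simp
  | cons t r ih2 => cases t <;> (simp [ih2]; try omega)

lemma bcnt (rows : List (List (Option Int))) (c : Int) :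
    rows.foldl (fun c row => row.foldl (fun c t => if t.isSome then c + 1 else c) c) c =
      c + (rows.map (fun row => ((row.countP (fun t => t.isSome)) : Int))).sum := by
  induction rows generalizing c with
  | nil => simp
  | cons row rows ih =>
    simp only [List.foldl_cons, List.map_cons, List.sum_cons]
    rw [bcnt_row, ih]; ring
lemma cntP_enum {α : Type} (xs : List α) (s : Int) (p : α → Bool) :
    (PySem.List.enumerate xs s).countP (fun e => p e.2) = xs.countP p := by
  conv_rhs => rw [← PySem.List.map_snd_enumerate xs s]
  rw [List.countP_map]
  rfl

lemma bridge_top (r0 : List (Option Int)) (rest : List (List (Option Int))) (my : Int) :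
    ((PySem.List.enumerate (r0 :: rest)).any (fun yr =>
        (PySem.List.enumerate yr.2).any (pTop ((r0.length : Int) - 1) my yr.1)))
    = (PySem.List.pyRange 1 ((r0.length : Int) - 1) 1).any
        (fun x => PySem.List.pyGet? r0 x == some none) := by
  rw [Bool.eq_iff_iff]
  simp only [PySem.List.enumerate_cons, List.any_cons, Bool.or_eq_true,
    List.any_eq_true, PySem.List.mem_pyRange_one, pTop, pvCorner, PySem.List.mem_enumerate_iff]
  simp only [beq_iff_eq, Bool.and_eq_true]
  simp
  constructor
  · rintro (⟨k, ⟨hk, hnone⟩, ⟨⟨hk0, _⟩, hklen⟩, _⟩ | ⟨k, ⟨hk, _⟩, habs⟩)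
    · refine ⟨(k : Int), ⟨by omega, by omega⟩, ?_⟩
      rw [PySem.List.pyGet?_natCast]
      simp [hk, hnone]
    · omega
  · rintro ⟨x, ⟨h1, h2⟩, hget⟩
    left
    rw [show PySem.List.pyGet? r0 x = r0[x.toNat]? from PySem.List.pyGet?_of_nonneg r0 (i := x) (by omega)] at hget
    rw [List.getElem?_eq_some_iff] at hget
    obtain ⟨hlt, hnone⟩ := hget
    refine ⟨x.toNat, ⟨hlt, hnone⟩, ⟨⟨by omega, Or.inl (by omega)⟩, by omega⟩, Or.inl (by omega)⟩
lemma bridge_bottom (sample : List (List (Option Int))) (hne : sample ≠ []) (mx : Int) :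
    ((PySem.List.enumerate sample).any (fun yr =>
        (PySem.List.enumerate yr.2).any (pBottom mx ((sample.length : Int) - 1) yr.1)))
    = (!(((sample.length : Int) - 1) == 0) &&
        (PySem.List.enumerate (PySem.List.pyGetD sample ((sample.length : Int) - 1) [])).any
          (fun xt => !(xt.1 == 0) && !(xt.1 == mx) && xt.2 == none)) := by
  have hn : 1 ≤ sample.length := by
    cases sample with | nil => simp at hne | cons a l => simp
  have hcast : ((sample.length : Int) - 1) = ((sample.length - 1 : Nat) : Int) := by omega
  rw [hcast, PySem.List.pyGetD_natCast, List.getD_eq_getElem?_getD,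
    List.getElem?_eq_getElem (by omega), Option.getD_some]
  rw [Bool.eq_iff_iff]
  simp only [any_enum_iff, pBottom, pvCorner, Bool.and_eq_true, Bool.not_eq_true',
    beq_iff_eq, Bool.or_eq_false_iff, Bool.and_eq_false_iff, beq_eq_false_iff_ne]
  constructor
  · rintro ⟨j, hj, k, hk, ⟨⟨hnone, ⟨⟨hA, hB⟩, hC⟩, hD⟩, hj0⟩, hjmy⟩
    obtain rfl : j = sample.length - 1 := by omega
    refine ⟨by omega, k, hk, ⟨?_, ?_⟩, hnone⟩
    · rcases hB with h | h <;> omega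
    · rcases hD with h | h <;> omega
  · rintro ⟨hmy0, k, hk, ⟨hk0, hkmx⟩, hnone⟩
    exact ⟨sample.length - 1, by omega, k, hk, ⟨⟨hnone,
      ⟨⟨Or.inl (by omega), Or.inl (by omega)⟩, Or.inl (by omega)⟩, Or.inl (by omega)⟩, by omega⟩, by omega⟩
lemma take1_eq (row : List (Option Int)) :
    row.take 1 = [(none : Option Int)] ↔ ∃ _ : 0 < row.length, row[0] = none := by
  cases row with
  | nil => simp
  | cons a l => simp [List.take_succ_cons]

lemma bridge_left (sample : List (List (Option Int))) (hne : sample ≠ []) (mx : Int) :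
    ((PySem.List.enumerate sample).any (fun yr =>
        (PySem.List.enumerate yr.2).any (pLeft mx ((sample.length : Int) - 1) yr.1)))
    = (PySem.List.slice sample (some 1) (some ((sample.length : Int) - 1))).any
        (fun row => PySem.List.slice row none (some 1) == [(none : Option Int)]) := by
  have hn : 1 ≤ sample.length := by
    cases sample with | nil => simp at hne | cons a l => simp
  have hcast : ((sample.length : Int) - 1) = ((sample.length - 1 : Nat) : Int) := by omega
  have h1 : (1 : Int) = ((1 : Nat) : Int) := rfl
  rw [hcast, h1, PySem.List.slice_natCast]
  have hto : ∀ row : List (Option Int), PySem.List.slice row none (some ((1:Nat):Int)) = row.take 1 := by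
    intro row
    rw [PySem.List.slice_to row (by omega)]
    rfl
  simp only [hto]
  rw [Bool.eq_iff_iff]
  simp only [any_enum_iff]
  simp only [pLeft, pvCorner, Bool.and_eq_true, Bool.not_eq_true',
    beq_iff_eq, Bool.or_eq_false_iff, Bool.and_eq_false_iff, beq_eq_false_iff_ne,
    List.any_eq_true, List.mem_iff_getElem, List.length_take, List.length_drop,
    List.getElem_take, List.getElem_drop, take1_eq]
  constructor
  · rintro ⟨j, hj, k, hk, ⟨⟨hnone, ⟨⟨hA, hB⟩, hC⟩, hD⟩, hk0⟩⟩
    obtain rfl : k = 0 := by omega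
    have hj0 : j ≠ 0 := by rcases hA with h | h <;> omega
    have hjmy : j ≠ sample.length - 1 := by rcases hB with h | h <;> omega
    exact ⟨sample[j], ⟨j - 1, by omega, by congr 1; omega⟩, by omega, hnone⟩
  · rintro ⟨x, ⟨i, hi, rfl⟩, hpos, hnone⟩
    exact ⟨1 + i, by omega, 0, hpos, ⟨⟨hnone,
      ⟨⟨Or.inr (by omega), Or.inr (by omega)⟩, Or.inr (by omega)⟩, Or.inr (by omega)⟩, by omega⟩⟩
lemma slice1_eq (row : List (Option Int)) (mx : Int) (hmx : -1 ≤ mx) :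
    PySem.List.slice row (some mx) (some (mx + 1)) = [(none : Option Int)] ↔
      ∃ (k : Nat) (_ : k < row.length), (k : Int) = mx ∧ row[k] = none := by
  by_cases h0 : 0 ≤ mx
  · rw [PySem.List.slice_toNat row (by omega) (by omega)]
    have ht : (mx + 1).toNat - mx.toNat = 1 := by omega
    rw [ht, take1_eq]
    constructor
    · rintro ⟨hpos, hnone⟩
      refine ⟨mx.toNat, by simp at hpos; omega, by omega, ?_⟩
      rw [List.getElem_drop] at hnone
      simpa using hnone
    · rintro ⟨k, hk, hkmx, hnone⟩
      obtain rfl : mx.toNat = k := by omega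
      refine ⟨by simp; omega, ?_⟩
      rw [List.getElem_drop]
      simpa using hnone
  · obtain rfl : mx = -1 := by omega
    constructor
    · intro h
      have := congrArg List.length h
      rw [PySem.List.length_slice] at this
      simp at this
    · rintro ⟨k, hk, hkmx, _⟩
      omega

lemma bridge_right (sample : List (List (Option Int))) (hne : sample ≠ []) (mx : Int) (hmx : -1 ≤ mx) :
    ((PySem.List.enumerate sample).any (fun yr =>
        (PySem.List.enumerate yr.2).any (pRight mx ((sample.length : Int) - 1) yr.1)))
    = (!(mx == 0) && (PySem.List.slice sample (some 1) (some ((sample.length : Int) - 1))).any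
        (fun row => PySem.List.slice row (some mx) (some (mx + 1)) == [(none : Option Int)])) := by
  have hn : 1 ≤ sample.length := by
    cases sample with | nil => simp at hne | cons a l => simp
  have hcast : ((sample.length : Int) - 1) = ((sample.length - 1 : Nat) : Int) := by omega
  rw [hcast]
  have hs : PySem.List.slice sample (some 1) (some ((sample.length - 1 : Nat) : Int)) =
      (sample.drop 1).take (sample.length - 1 - 1) := by
    rw [show (1:Int) = ((1:Nat):Int) from rfl, PySem.List.slice_natCast]
  rw [hs, Bool.eq_iff_iff]
  simp only [any_enum_iff]
  simp only [pRight, pvCorner, Bool.and_eq_true, Bool.not_eq_true',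
    beq_iff_eq, Bool.or_eq_false_iff, Bool.and_eq_false_iff, beq_eq_false_iff_ne,
    List.any_eq_true, List.mem_iff_getElem, List.length_take, List.length_drop,
    List.getElem_take, List.getElem_drop, slice1_eq _ _ hmx]
  constructor
  · rintro ⟨j, hj, k, hk, ⟨⟨⟨hnone, ⟨⟨hA, hB⟩, hC⟩, hD⟩, hk0⟩, hkmx⟩⟩
    have hj0 : j ≠ 0 := by rcases hC with h | h <;> omega
    have hjmy : j ≠ sample.length - 1 := by rcases hD with h | h <;> omega
    exact ⟨by omega, sample[j], ⟨j - 1, by omega, by congr 1; omega⟩, k, hk, by omega, hnone⟩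
  · rintro ⟨hmx0, x, ⟨i, hi, rfl⟩, k, hk, hkmx, hnone⟩
    exact ⟨1 + i, by omega, k, hk, ⟨⟨⟨hnone,
      ⟨⟨Or.inr (by omega), Or.inr (by omega)⟩, Or.inr (by omega)⟩, Or.inr (by omega)⟩,
      by omega⟩, by omega⟩⟩

lemma bridge_cnt (sample : List (List (Option Int))) :
    ((PySem.List.enumerate sample).map
        (fun yr => (((PySem.List.enumerate yr.2).countP (fun e => e.2.isSome)) : Int))).sum
      = (sample.map (fun row => ((row.countP (fun t => t.isSome)) : Int))).sum := by
  conv_rhs => rw [← PySem.List.map_snd_enumerate sample 0]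
  rw [List.map_map]
  refine congrArg _ (List.map_congr_left (fun yr _ => ?_))
  simp [cntP_enum]

-- ===== VERDICT (by name: the statement is the Claim_ definition above) =====
theorem check_if_sample_has_wall_spec : Claim_equal_check_if_sample_has_wall := by
  intro sample hdom hpre
  obtain ⟨r0, rest, rfl⟩ : ∃ r0 rest, sample = r0 :: rest := by
    cases sample with
    | nil => exact absurd rfl hpre
    | cons a l => exact ⟨a, l, rfl⟩
  unfold Spec_check_if_sample_has_wall
  unfold check_if_sample_has_wall check_if_sample_has_wall_alt
  simp only [List.headD_cons, PySem.List.len_eq, outer_char, bcnt, Bool.false_or, zero_add,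
    Prod.mk.injEq, List.cons.injEq, and_true, true_and]
  refine ⟨⟨?_, ?_, ?_, ?_⟩, ?_⟩
  · exact bridge_top r0 rest _
  · exact bridge_right (r0 :: rest) (by simp) _ (by omega)
  · exact bridge_bottom (r0 :: rest) (by simp) _
  · exact bridge_left (r0 :: rest) (by simp) _
  · exact bridge_cnt (r0 :: rest)
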